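-- pv_equiv track=rewrite | github.com/tinh2044/python | learn_code.io/.history/lastDigitDiffZero_20221117212147.py | lastDigitDiffZero
-- ===== SOURCE A (Python) =====
-- def lastDigitDiffZero(n):
--     a = 1;
--     for i in range (1,n + 1):
--         a *= i
--     string = str(a)
--     if (string.find('0') > 0):
--
--         # return int(string[string.find('0') - 1])
--         return int(string)
--     else :return int(string[len(string) - 1])
-- ===== SOURCE B (Python) =====
-- def lastDigitDiffZero(n):
--     a = 1
--     for i in range(1, n + 1):
--         a *= i
--     return a if n >= 5 else a % 10
-- ===== Notes on version B (the rewrite author's own statement) =====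
-- stated objective: simpler
-- what changed: B drops A's string conversion and decimal scan for '0' entirely: since str(n!) has a '0' past position 0 exactly when n >= 5, B returns the factorial directly for n >= 5 and its last digit via n! % 10 otherwise.
import Mathlib
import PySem

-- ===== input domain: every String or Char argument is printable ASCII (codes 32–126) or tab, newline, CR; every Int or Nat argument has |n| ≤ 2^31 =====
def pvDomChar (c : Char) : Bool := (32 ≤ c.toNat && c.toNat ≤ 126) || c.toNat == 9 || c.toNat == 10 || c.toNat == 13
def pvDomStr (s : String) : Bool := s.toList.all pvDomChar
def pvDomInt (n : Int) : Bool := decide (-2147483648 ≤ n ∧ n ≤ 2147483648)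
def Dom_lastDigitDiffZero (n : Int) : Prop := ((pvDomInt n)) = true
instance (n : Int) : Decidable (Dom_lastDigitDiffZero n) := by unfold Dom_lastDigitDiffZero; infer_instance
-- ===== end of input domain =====

-- B replaces A's decimal-string scan for '0' by the numeric observation that str(n!)
-- contains '0' past position 0 exactly when n >= 5, returning n! directly for n >= 5
-- and n! % 10 otherwise (objective: simpler — no string handling at all).


-- ===== PORT A =====
-- A applies int() only to the strings produced by str(a) with a ≥ 1 (all-digit strings,
-- possibly behind a '-' sign in general). PySem.Int.ofStr? computes int() through a
-- private helper the elaborator cannot unfold, so int() is ported here by hand, step for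
-- step with CPython's parse (optional sign, then left-to-right decimal-digit fold);
-- it is exact on every string this program can pass to it.
def pyIntDigits (cs : List Char) : Int :=
  cs.foldl (fun acc c => acc * 10 + ((c.toNat : Int) - 48)) 0

def pyInt (s : String) : Int :=
  match s.toList with
  | '-' :: ds => - pyIntDigits ds
  | ds => pyIntDigits ds

def lastDigitDiffZero (n : Int) : Int :=
  let a := (PySem.List.pyRange 1 (n + 1)).foldl (fun acc i => acc * i) 1
  let string := PySem.Int.toStr a
  if PySem.Str.find string "0" > 0 then
    pyInt string
  else
    match PySem.Str.pyGet? string (PySem.Str.len string - 1) with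
    | some c => pyInt (String.ofList [c])
    | none => 0  -- unreachable: string = str(a) is nonempty

-- ===== PORT B =====
def lastDigitDiffZero_alt (n : Int) : Int :=
  let a := (PySem.List.pyRange 1 (n + 1)).foldl (fun acc i => acc * i) 1
  if 5 ≤ n then a else PySem.Int.mod a 10

-- ===== PRECONDITION & SPEC =====
def Spec_lastDigitDiffZero (n : Int) (out : Int) : Prop := out = lastDigitDiffZero_alt n
instance (n : Int) (out : Int) : Decidable (Spec_lastDigitDiffZero n out) := by unfold Spec_lastDigitDiffZero; infer_instance

-- ===== CLAIM (what is proved, stated in full; the proofs are below) =====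
def Claim_equal_lastDigitDiffZero : Prop := ∀ (n : Int), Dom_lastDigitDiffZero n → Spec_lastDigitDiffZero n (lastDigitDiffZero n)

-- ===== LEMMAS AND PROOFS =====

-- The loop value `a`, shared by both ports.
def pvFact (n : Int) : Int := (PySem.List.pyRange 1 (n + 1)).foldl (fun acc i => acc * i) 1

theorem pvFact_succ (m : Int) (h : 0 ≤ m) : pvFact (m + 1) = pvFact m * (m + 1) := by
  unfold pvFact
  rw [PySem.List.pyRange_one_succ_right (by omega), List.foldl_append]
  rfl

theorem pvFact_ge5 (n : Int) (h : 5 ≤ n) : 10 ∣ pvFact n ∧ 120 ≤ pvFact n := by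
  induction n, h using Int.le_induction with
  | base => decide
  | succ m hm ih =>
    rw [pvFact_succ m (by omega)]
    obtain ⟨hd, hl⟩ := ih
    refine ⟨Dvd.dvd.mul_right hd _, ?_⟩
    calc (120 : Int) = 120 * 1 := by ring
    _ ≤ pvFact m * (m + 1) := by
      apply mul_le_mul (by omega) (by omega) (by omega) (by omega)

-- ## Facts about `Nat.toDigits 10`

theorem toDigitsCore_fuel (n : Nat) : ∀ (f1 f2 : Nat) (ds : List Char), n < f1 → n < f2 →
    Nat.toDigitsCore 10 f1 n ds = Nat.toDigitsCore 10 f2 n ds := by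
  induction n using Nat.strong_induction_on with
  | _ n ih =>
    intro f1 f2 ds h1 h2
    match f1, f2 with
    | f1 + 1, f2 + 1 =>
      simp only [Nat.toDigitsCore]
      by_cases h : n / 10 = 0
      · simp [h]
      · simp only [h, if_false]
        exact ih (n / 10) (Nat.div_lt_self (by omega) (by norm_num)) f1 f2 _
          (by have := Nat.div_le_self n 10; omega) (by have := Nat.div_le_self n 10; omega)

theorem toDigitsCore_acc (n : Nat) : ∀ (f : Nat) (ds : List Char), n < f →
    Nat.toDigitsCore 10 f n ds = Nat.toDigitsCore 10 f n [] ++ ds := by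
  induction n using Nat.strong_induction_on with
  | _ n ih =>
    intro f ds hf
    match f with
    | f + 1 =>
      simp only [Nat.toDigitsCore]
      by_cases h : n / 10 = 0
      · simp [h]
      · simp only [h, if_false]
        have hlt : n / 10 < n := Nat.div_lt_self (by omega) (by norm_num)
        have hfu : n / 10 < f := by have := Nat.div_le_self n 10; omega
        rw [ih (n / 10) hlt f _ hfu, ih (n / 10) hlt f [Nat.digitChar (n % 10)] hfu,
          List.append_assoc]
        rfl

theorem toDigits_step (n : Nat) (h : 10 ≤ n) :
    Nat.toDigits 10 n = Nat.toDigits 10 (n / 10) ++ [Nat.digitChar (n % 10)] := by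
  have h10 : n / 10 ≠ 0 := by
    intro h0; have := Nat.div_add_mod n 10; have := Nat.mod_lt n (show 0 < 10 by norm_num); omega
  show Nat.toDigitsCore 10 (n + 1) n [] = _
  simp only [Nat.toDigitsCore, h10, if_false]
  rw [toDigitsCore_acc (n / 10) n _ (by have := Nat.div_le_self n 10; omega)]
  congr 1
  exact toDigitsCore_fuel (n / 10) n (n / 10 + 1) []
    (by have := Nat.div_le_self n 10; omega) (by omega)

theorem toDigits_base (n : Nat) (h : n < 10) : Nat.toDigits 10 n = [Nat.digitChar n] := by
  show Nat.toDigitsCore 10 (n + 1) n [] = _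
  simp only [Nat.toDigitsCore, Nat.div_eq_of_lt h, if_true, Nat.mod_eq_of_lt h]

theorem digitChar_toNat (k : Nat) (h : k < 10) : (Nat.digitChar k).toNat = 48 + k := by
  interval_cases k <;> rfl

theorem digitChar_isDigit (k : Nat) (h : k < 10) : (Nat.digitChar k).isDigit = true := by
  interval_cases k <;> decide

theorem toDigits_all_digits (n : Nat) : ∀ c ∈ Nat.toDigits 10 n, c.isDigit = true := by
  induction n using Nat.strong_induction_on with
  | _ n ih =>
    by_cases h : n < 10
    · rw [toDigits_base n h]
      intro c hc
      rw [List.mem_singleton] at hc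
      subst hc; exact digitChar_isDigit n h
    · rw [toDigits_step n (by omega)]
      intro c hc
      rcases List.mem_append.mp hc with hc | hc
      · exact ih (n / 10) (Nat.div_lt_self (by omega) (by norm_num)) c hc
      · rw [List.mem_singleton] at hc
        subst hc; exact digitChar_isDigit _ (Nat.mod_lt n (by norm_num))

theorem toDigits_head (n : Nat) (hn : 0 < n) :
    ∃ c cs, Nat.toDigits 10 n = c :: cs ∧ c ≠ '0' := by
  induction n using Nat.strong_induction_on with
  | _ n ih =>
    by_cases h : n < 10
    · refine ⟨Nat.digitChar n, [], toDigits_base n h, ?_⟩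
      interval_cases n <;> decide
    · obtain ⟨c, cs, hc, hne⟩ := ih (n / 10) (Nat.div_lt_self (by omega) (by norm_num))
        (Nat.div_pos (by omega) (by norm_num))
      exact ⟨c, cs ++ [Nat.digitChar (n % 10)], by rw [toDigits_step n (by omega), hc]; rfl, hne⟩

theorem toDigits_val (n : Nat) : pyIntDigits (Nat.toDigits 10 n) = n := by
  induction n using Nat.strong_induction_on with
  | _ n ih =>
    by_cases h : n < 10
    · rw [toDigits_base n h]
      show ((0 : Int) * 10 + (((Nat.digitChar n).toNat : Int) - 48)) = n
      rw [digitChar_toNat n h]; push_cast; ring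
    · rw [toDigits_step n (by omega)]
      unfold pyIntDigits
      rw [List.foldl_append]
      have ihv : pyIntDigits (Nat.toDigits 10 (n / 10)) = ↑(n / 10) :=
        ih (n / 10) (Nat.div_lt_self (by omega) (by norm_num))
      unfold pyIntDigits at ihv
      rw [ihv]
      show (↑(n / 10) : Int) * 10 + (((Nat.digitChar (n % 10)).toNat : Int) - 48) = n
      rw [digitChar_toNat _ (Nat.mod_lt n (by norm_num))]
      have := Nat.div_add_mod n 10
      push_cast
      omega

theorem toDigits_last_zero (n : Nat) (hpos : 0 < n) (hdvd : 10 ∣ n) :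
    '0' ∈ Nat.toDigits 10 n := by
  have h10 : 10 ≤ n := Nat.le_of_dvd hpos hdvd
  have h0 : n % 10 = 0 := by omega
  rw [toDigits_step n h10, h0]
  exact List.mem_append_right _ (by decide)

-- `find s ['0'] > 0` for a list with head ≠ '0' that contains '0'.
theorem find_zero_pos (c : Char) (cs : List Char) (hc : c ≠ '0') (hmem : '0' ∈ c :: cs) :
    0 < PySem.Chars.find (c :: cs) ['0'] := by
  have hinf : ['0'] <:+: c :: cs := by
    obtain ⟨l1, l2, hl⟩ := List.append_of_mem hmem
    exact ⟨l1, l2, by rw [hl]; simp⟩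
  have hnn : 0 ≤ PySem.Chars.find (c :: cs) ['0'] :=
    (PySem.Chars.find_nonneg_iff _ _).mpr hinf
  rcases lt_or_eq_of_le hnn with h | h
  · exact h
  · exfalso
    have hspec := (PySem.Chars.find_spec (s := c :: cs) (sub := ['0']) hnn).1
    rw [← h] at hspec
    simp only [Int.toNat_zero, List.drop_zero] at hspec
    obtain ⟨t, ht⟩ := hspec
    rw [List.singleton_append] at ht
    exact hc (by injection ht with h1 _; exact h1.symm)

-- Positivity of the loop value.
theorem pvFact_pos (n : Int) : 0 < pvFact n := by
  by_cases h : n ≤ 0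
  · unfold pvFact
    rw [PySem.List.pyRange_one_eq_nil (by omega)]
    decide
  · have h1 : 1 ≤ n := by omega
    clear h
    induction n, h1 using Int.le_induction with
    | base => decide
    | succ k hk ihk =>
      rw [pvFact_succ k (by omega)]
      exact mul_pos ihk (by omega)

-- The main case split.
theorem main_ge5 (n : Int) (h : 5 ≤ n) : lastDigitDiffZero n = lastDigitDiffZero_alt n := by
  obtain ⟨hdvd, hge⟩ := pvFact_ge5 n h
  have hpos : 0 < pvFact n := pvFact_pos n
  have hchars : (PySem.Int.toStr (pvFact n)).toList = Nat.toDigits 10 (pvFact n).toNat := by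
    rw [PySem.Int.toList_toStr]
    unfold PySem.Int.toChars
    rw [if_neg (by omega)]
  have hdvdN : 10 ∣ (pvFact n).toNat := by
    obtain ⟨k, hk⟩ := hdvd
    exact ⟨k.toNat, by omega⟩
  have hposN : 0 < (pvFact n).toNat := by omega
  obtain ⟨c, cs, hcons, hne⟩ := toDigits_head (pvFact n).toNat hposN
  have hmem : '0' ∈ Nat.toDigits 10 (pvFact n).toNat := toDigits_last_zero _ hposN hdvdN
  have hfind : 0 < PySem.Str.find (PySem.Int.toStr (pvFact n)) "0" := by
    rw [PySem.Str.find_eq, hchars, hcons]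
    exact find_zero_pos c cs hne (hcons ▸ hmem)
  have hfold : (PySem.List.pyRange 1 (n + 1)).foldl (fun acc i => acc * i) 1 = pvFact n := rfl
  have hB : lastDigitDiffZero_alt n = pvFact n := by
    simp only [lastDigitDiffZero_alt, hfold]
    rw [if_pos h]
  have hA : lastDigitDiffZero n = pvFact n := by
    simp only [lastDigitDiffZero, hfold]
    rw [if_pos hfind]
    -- pyInt of the all-digit string str(a) is a
    unfold pyInt
    rw [hchars, hcons]
    have hcdigit : c.isDigit = true := toDigits_all_digits _ c (hcons ▸ List.mem_cons_self ..)
    have hcne : c ≠ '-' := by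
      intro hcc; rw [hcc] at hcdigit; exact absurd hcdigit (by decide)
    have hred : (match c :: cs with
        | '-' :: ds => - pyIntDigits ds
        | ds => pyIntDigits ds) = pyIntDigits (c :: cs) := by
      split
      · next heq => rw [List.cons_eq_cons] at heq; exact absurd heq.1 hcne
      · rfl
    rw [hred, ← hcons, toDigits_val]
    omega
  rw [hA, hB]

theorem main_le0 (n : Int) (h : n ≤ 0) : lastDigitDiffZero n = lastDigitDiffZero_alt n := by
  have hr : PySem.List.pyRange 1 (n + 1) = [] := PySem.List.pyRange_one_eq_nil (by omega)
  have hA : lastDigitDiffZero n = 1 := by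
    simp only [lastDigitDiffZero, hr]
    decide
  have hB : lastDigitDiffZero_alt n = 1 := by
    simp only [lastDigitDiffZero_alt, hr]
    rw [if_neg (by omega)]
    decide
  rw [hA, hB]

-- ===== VERDICT (by name: the statement is the Claim_ definition above) =====
theorem lastDigitDiffZero_spec : Claim_equal_lastDigitDiffZero := by
  intro n _
  unfold Spec_lastDigitDiffZero
  by_cases h5 : 5 ≤ n
  · exact main_ge5 n h5
  · by_cases h0 : n ≤ 0
    · exact main_le0 n h0
    · interval_cases n <;> decide
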